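-- pv_equiv track=rewrite | github.com/jxie0755/Learning_Python | ZZProject/EightQueens/queens_4.py | cross_coor_1
-- ===== SOURCE A (Python) =====
-- def cross_coor_1(coor): # of \ cross
--     """output a list of cross of coor in the direction of /"""
--     x, y = coor[0], coor[1]
--     cross_coor_list = [coor]
--     before, after = coor[:], coor[:]
--     while before[0] > 1 and before[1] < 4:
--         x, y = before[0], before[1]
--         before = (x-1, y+1)
--         cross_coor_list = [before] + cross_coor_list
--
--     while after[0] < 4 and after[1] > 1:
--         x, y = after[0], after[1]
--         after = (x+1, y-1)
--         cross_coor_list = cross_coor_list + [after]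
--
--     return cross_coor_list
-- ===== SOURCE B (Python) =====
-- def cross_coor_1(coor):
--     """output a list of cross of coor in the direction of /"""
--     x, y = coor[0], coor[1]
--     n1 = max(0, min(x - 1, 4 - y))
--     n2 = max(0, min(4 - x, y - 1))
--     return ([(x - k, y + k) for k in range(n1, 0, -1)]
--             + [coor]
--             + [(x + k, y - k) for k in range(1, n2 + 1)])
-- ===== Notes on version B (the rewrite author's own statement) =====
-- stated objective: alternative
-- what changed: Replaces the two condition-terminated while loops (one prepending, one appending) by closed-form step counts n1=max(0,min(x-1,4-y)) and n2=max(0,min(4-x,y-1)) and two range comprehensions spliced around coor.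
import Mathlib
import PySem

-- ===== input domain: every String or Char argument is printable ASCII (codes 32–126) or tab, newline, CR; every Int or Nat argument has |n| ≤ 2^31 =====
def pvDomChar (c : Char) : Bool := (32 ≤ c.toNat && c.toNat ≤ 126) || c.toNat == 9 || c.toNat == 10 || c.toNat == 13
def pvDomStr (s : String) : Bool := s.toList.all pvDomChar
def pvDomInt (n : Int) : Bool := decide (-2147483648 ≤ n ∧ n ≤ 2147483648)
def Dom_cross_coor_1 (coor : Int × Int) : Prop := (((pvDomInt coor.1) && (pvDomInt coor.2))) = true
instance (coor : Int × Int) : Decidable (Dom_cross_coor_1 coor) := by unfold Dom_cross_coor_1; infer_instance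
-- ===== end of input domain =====

-- B replaces A's two while loops by closed-form step counts and two range comprehensions; same cost.

-- ===== PORT A =====
-- first while loop: walks up-left, prepending each new point
def crossLoop1 (before : Int × Int) (acc : List (Int × Int)) : List (Int × Int) :=
  if before.1 > 1 ∧ before.2 < 4 then
    let b := (before.1 - 1, before.2 + 1)
    crossLoop1 b (b :: acc)
  else acc
termination_by (before.1 - 1).toNat
decreasing_by simp_all

-- second while loop: walks down-right, appending each new point
def crossLoop2 (after : Int × Int) (acc : List (Int × Int)) : List (Int × Int) :=
  if after.1 < 4 ∧ after.2 > 1 then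
    let a := (after.1 + 1, after.2 - 1)
    crossLoop2 a (acc ++ [a])
  else acc
termination_by (4 - after.1).toNat
decreasing_by simp_all

def cross_coor_1 (coor : Int × Int) : List (Int × Int) :=
  crossLoop2 coor (crossLoop1 coor [coor])

-- ===== PORT B =====
def cross_coor_1_alt (coor : Int × Int) : List (Int × Int) :=
  let x := coor.1
  let y := coor.2
  let n1 : Int := max 0 (min (x - 1) (4 - y))
  let n2 : Int := max 0 (min (4 - x) (y - 1))
  ((PySem.List.pyRange n1 0 (-1)).map (fun k => (x - k, y + k)))
    ++ [coor]
    ++ ((PySem.List.pyRange 1 (n2 + 1) 1).map (fun k => (x + k, y - k)))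

-- ===== PRECONDITION & SPEC =====
def Spec_cross_coor_1 (coor : Int × Int) (out : List (Int × Int)) : Prop := out = cross_coor_1_alt coor
instance (coor : Int × Int) (out : List (Int × Int)) : Decidable (Spec_cross_coor_1 coor out) := by unfold Spec_cross_coor_1; infer_instance

-- ===== CLAIM (what is proved, stated in full; the proofs are below) =====
def Claim_equal_cross_coor_1 : Prop := ∀ (coor : Int × Int), Dom_cross_coor_1 coor → Spec_cross_coor_1 coor (cross_coor_1 coor)

-- ===== LEMMAS AND PROOFS =====

theorem crossLoop1_eq (n : Nat) : ∀ (x y : Int) (acc : List (Int × Int)),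
    max 0 (min (x - 1) (4 - y)) = (n : Int) →
    crossLoop1 (x, y) acc
      = ((PySem.List.pyRange (n : Int) 0 (-1)).map (fun k => (x - k, y + k))) ++ acc := by
  induction n with
  | zero =>
    intro x y acc h
    rw [crossLoop1.eq_def]
    have h1 : ¬ ((x, y).1 > 1 ∧ (x, y).2 < 4) := by simp; omega
    rw [if_neg h1, PySem.List.pyRange_neg_one_eq_nil (by omega)]
    simp
  | succ n ih =>
    intro x y acc h
    have hc : x > 1 ∧ y < 4 := by omega
    rw [crossLoop1.eq_def, if_pos (by simpa using hc)]
    have h' : max 0 (min ((x - 1) - 1) (4 - (y + 1))) = (n : Int) := by omega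
    rw [ih (x - 1) (y + 1) _ h']
    rw [PySem.List.pyRange_neg_one, PySem.List.pyRange_neg_one]
    have e1 : ((n : Int) - 0).toNat = n := by omega
    have e2 : (((n + 1 : Nat) : Int) - 0).toNat = n + 1 := by push_cast; omega
    rw [e1, e2, List.range_succ]
    simp only [List.map_map, List.map_append, List.map_cons, List.map_nil,
      List.append_assoc, List.cons_append, List.nil_append]
    congr 1
    · apply List.map_congr_left
      intro k hk
      simp only [Function.comp_apply, Prod.mk.injEq]
      constructor <;> push_cast <;> ring
    · simp only [List.cons.injEq, Prod.mk.injEq]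
      refine ⟨⟨by push_cast; ring, by push_cast; ring⟩, trivial⟩

theorem crossLoop2_eq (n : Nat) : ∀ (x y : Int) (acc : List (Int × Int)),
    max 0 (min (4 - x) (y - 1)) = (n : Int) →
    crossLoop2 (x, y) acc
      = acc ++ ((PySem.List.pyRange 1 ((n : Int) + 1) 1).map (fun k => (x + k, y - k))) := by
  induction n with
  | zero =>
    intro x y acc h
    rw [crossLoop2.eq_def]
    have h1 : ¬ ((x, y).1 < 4 ∧ (x, y).2 > 1) := by simp; omega
    rw [if_neg h1, PySem.List.pyRange_one_eq_nil (by omega)]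
    simp
  | succ n ih =>
    intro x y acc h
    have hc : x < 4 ∧ y > 1 := by omega
    rw [crossLoop2.eq_def, if_pos (by simpa using hc)]
    have h' : max 0 (min (4 - (x + 1)) ((y - 1) - 1)) = (n : Int) := by omega
    rw [ih (x + 1) (y - 1) _ h']
    rw [PySem.List.pyRange_one, PySem.List.pyRange_one]
    have e1 : (((n : Nat) : Int) + 1 - 1).toNat = n := by omega
    have e2 : ((((n : Nat) + 1 : Nat) : Int) + 1 - 1).toNat = n + 1 := by push_cast; omega
    rw [e1, e2]
    rw [List.range_succ_eq_map]
    simp only [List.map_map, List.map_cons, List.append_assoc, List.cons_append,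
      List.nil_append]
    congr 1
    simp only [List.cons.injEq, Prod.mk.injEq]
    refine ⟨⟨?_, ?_⟩, ?_⟩
    · push_cast; ring
    · push_cast; ring
    · apply List.map_congr_left
      intro k hk
      simp only [Function.comp_apply, Prod.mk.injEq]
      constructor <;> push_cast <;> ring

-- ===== VERDICT (by name: the statement is the Claim_ definition above) =====
theorem cross_coor_1_spec : Claim_equal_cross_coor_1 := by
  intro coor _
  obtain ⟨x, y⟩ := coor
  unfold Spec_cross_coor_1 cross_coor_1 cross_coor_1_alt
  have h1 : max 0 (min (x - 1) (4 - y)) = ((max 0 (min (x - 1) (4 - y))).toNat : Int) := by omega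
  have h2 : max 0 (min (4 - x) (y - 1)) = ((max 0 (min (4 - x) (y - 1))).toNat : Int) := by omega
  rw [crossLoop1_eq _ x y [(x, y)] h1, crossLoop2_eq _ x y _ h2, ← h1, ← h2]
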